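-- pv_equiv track=rewrite | github.com/smejak/compaction | compaction/algorithms/kvmerger.py | _split_sets
-- ===== SOURCE A (Python) =====
-- from typing import Tuple, List, Optional
--
-- def _split_sets(sets: List[List[int]], t: int) -> List[List[int]]:
--     """
--     Increase the number of sets to t by splitting the largest sets.
--     """
--     while len(sets) < t:
--         # Find largest set
--         max_size = 0
--         split_idx = 0
--         for i, s in enumerate(sets):
--             if len(s) > max_size:
--                 max_size = len(s)
--                 split_idx = i
--         if max_size <= 1:
--             break  # Can't split singletons
--         s = sets[split_idx]
--         mid = len(s) // 2
--         sets = sets[:split_idx] + [s[:mid], s[mid:]] + sets[split_idx + 1:]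
--     return sets
-- ===== SOURCE B (Python) =====
-- def _split_sets(sets, t):
--     """
--     Increase the number of sets to t by splitting the largest sets.
--     Level-batched: instead of rescanning the whole list for the single largest
--     set on every split, split ALL sets of the current maximum size in one
--     left-to-right pass (children are strictly smaller, so they never belong to
--     the current level), and repeat with the next maximum.
--     """
--     need = t - len(sets)
--     while need > 0:
--         m = max((len(s) for s in sets), default=0)
--         if m <= 1:
--             break
--         out = []
--         for s in sets:
--             if len(s) == m and need > 0:
--                 mid = len(s) // 2
--                 out.append(s[:mid])
--                 out.append(s[mid:])
--                 need -= 1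
--             else:
--                 out.append(s)
--         sets = out
--     return sets
-- ===== Notes on version B (the rewrite author's own statement) =====
-- stated objective: faster
-- what changed: Instead of rescanning the whole list to find and split one largest set per iteration, B computes the current maximum size m once and splits ALL sets of size m in a single left-to-right pass (children are strictly smaller, so A would have split exactly these sets next, left to right), repeating with the next maximum.
import Mathlib
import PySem

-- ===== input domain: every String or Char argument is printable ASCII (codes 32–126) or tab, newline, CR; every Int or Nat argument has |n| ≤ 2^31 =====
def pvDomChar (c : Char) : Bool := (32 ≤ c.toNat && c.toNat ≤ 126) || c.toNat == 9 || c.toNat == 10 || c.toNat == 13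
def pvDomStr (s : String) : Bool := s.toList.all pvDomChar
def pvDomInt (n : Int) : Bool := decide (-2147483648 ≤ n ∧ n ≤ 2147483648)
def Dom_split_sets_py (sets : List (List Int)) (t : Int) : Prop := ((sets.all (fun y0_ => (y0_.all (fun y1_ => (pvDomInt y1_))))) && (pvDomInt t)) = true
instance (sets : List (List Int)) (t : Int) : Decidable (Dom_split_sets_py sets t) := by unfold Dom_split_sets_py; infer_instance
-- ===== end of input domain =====

-- B replaces A's one-split-per-rescan loop by level-batched passes (split every
-- set of the current maximum size in one pass); measurably faster on large inputs.

-- ===== PORT A =====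
-- 'for i, s in enumerate(sets): if len(s) > max_size: max_size, split_idx = len(s), i'
-- state (i, max_size, split_idx); returns (max_size, split_idx)
def pvScanMax : List (List Int) → Int → Int → Int → Int × Int
  | [], _, ms, si => (ms, si)
  | s :: rest, i, ms, si =>
      if (s.length : Int) > ms then pvScanMax rest (i + 1) (s.length : Int) i
      else pvScanMax rest (i + 1) ms si

-- the while loop; each iteration grows the list by one, so 'fuel = t - len(sets)'
-- (exhausted exactly when len(sets) < t fails) makes the recursion structural.
-- (max_size, split_idx) = pvScanMax sets 0 0 0; s = sets[split_idx] (in range here);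
-- mid = len(s) // 2; the enumerate-scan and the slice expressions are written inline.
def pvLoopA : Nat → List (List Int) → List (List Int)
  | 0, sets => sets
  | fuel + 1, sets =>
      if (pvScanMax sets 0 0 0).1 ≤ 1 then sets
      else
        pvLoopA fuel (PySem.List.slice sets none (some (pvScanMax sets 0 0 0).2) ++
          [PySem.List.slice ((PySem.List.pyGet? sets (pvScanMax sets 0 0 0).2).getD [])
              none (some (PySem.Int.floordiv (((PySem.List.pyGet? sets (pvScanMax sets 0 0 0).2).getD []).length : Int) 2)),
           PySem.List.slice ((PySem.List.pyGet? sets (pvScanMax sets 0 0 0).2).getD [])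
              (some (PySem.Int.floordiv (((PySem.List.pyGet? sets (pvScanMax sets 0 0 0).2).getD []).length : Int) 2)) none] ++
          PySem.List.slice sets (some ((pvScanMax sets 0 0 0).2 + 1)) none)

def split_sets_py (sets : List (List Int)) (t : Int) : List (List Int) :=
  pvLoopA (t - (sets.length : Int)).toNat sets

-- ===== PORT B =====
-- 'max((len(s) for s in sets), default=0)' — exact as foldl max 0 since lengths are ≥ 0
def pvMaxLen (sets : List (List Int)) : Int :=
  sets.foldl (fun a s => max a (s.length : Int)) 0

-- one pass of B's inner for-loop: split each set of size m while need > 0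
-- (s[:mid]/s[mid:] with 0 ≤ mid ≤ len(s) are exactly take/drop)
def pvPass : List (List Int) → Int → Int → List (List Int) × Int
  | [], _, need => ([], need)
  | s :: rest, m, need =>
      if (s.length : Int) = m ∧ 0 < need then
        let r := pvPass rest m (need - 1)
        (s.take (s.length / 2) :: s.drop (s.length / 2) :: r.1, r.2)
      else
        let r := pvPass rest m need
        (s :: r.1, r.2)

-- B's outer while loop; 'need' strictly decreases each round, so 'fuel = need'
-- at entry (exhausted exactly when need > 0 fails) makes the recursion structural.
def pvLoopB : Nat → List (List Int) → Int → List (List Int)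
  | 0, sets, _ => sets
  | fuel + 1, sets, need =>
      if need ≤ 0 then sets
      else if pvMaxLen sets ≤ 1 then sets
      else pvLoopB fuel (pvPass sets (pvMaxLen sets) need).1 (pvPass sets (pvMaxLen sets) need).2

def split_sets_py_alt (sets : List (List Int)) (t : Int) : List (List Int) :=
  pvLoopB (t - (sets.length : Int)).toNat sets (t - (sets.length : Int))

-- ===== PRECONDITION & SPEC =====
def Spec_split_sets_py (sets : List (List Int)) (t : Int) (out : List (List Int)) : Prop := out = split_sets_py_alt sets t
instance (sets : List (List Int)) (t : Int) (out : List (List Int)) : Decidable (Spec_split_sets_py sets t out) := by unfold Spec_split_sets_py; infer_instance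

-- ===== CLAIM (what is proved, stated in full; the proofs are below) =====
def Claim_equal_split_sets_py : Prop := ∀ (sets : List (List Int)) (t : Int), Dom_split_sets_py sets t → Spec_split_sets_py sets t (split_sets_py sets t)

-- ===== LEMMAS AND PROOFS =====

theorem pvPass_le (l : List (List Int)) (m need : Int) : (pvPass l m need).2 ≤ need := by
  induction l generalizing need with
  | nil => simp [pvPass]
  | cons s rest ih =>
      simp only [pvPass]
      split
      · have := ih (need - 1); omega
      · exact ih need

theorem pvPass_lt (l : List (List Int)) (m need : Int) (hn : 0 < need)
    (hw : ∃ s ∈ l, (s.length : Int) = m) : (pvPass l m need).2 < need := by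
  induction l generalizing need with
  | nil => simp at hw
  | cons s rest ih =>
      simp only [pvPass]
      rcases hw with ⟨w, hw1, hw2⟩
      split
      · have := pvPass_le rest m (need - 1); omega
      · rename_i hcond
        rcases List.mem_cons.mp hw1 with rfl | hmem
        · exact absurd ⟨hw2, hn⟩ hcond
        · exact ih need hn ⟨w, hmem, hw2⟩

theorem pvFoldMax_ge (l : List (List Int)) (a : Int) :
    a ≤ l.foldl (fun a s => max a (s.length : Int)) a ∧
    ∀ x ∈ l, (x.length : Int) ≤ l.foldl (fun a s => max a (s.length : Int)) a := by
  induction l generalizing a with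
  | nil => simp
  | cons s rest ih =>
      have h := ih (max a (s.length : Int))
      refine ⟨by simpa using le_trans (le_max_left _ _) h.1, ?_⟩
      intro x hx
      rcases List.mem_cons.mp hx with rfl | hmem
      · exact le_trans (le_max_right _ _) h.1
      · exact h.2 x hmem

theorem pvFoldMax_mem (l : List (List Int)) (a : Int) :
    l.foldl (fun a s => max a (s.length : Int)) a = a ∨
    ∃ s ∈ l, l.foldl (fun a s => max a (s.length : Int)) a = (s.length : Int) := by
  induction l generalizing a with
  | nil => simp
  | cons s rest ih =>
      rcases ih (max a (s.length : Int)) with h | ⟨w, hw1, hw2⟩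
      · simp only [List.foldl_cons, h]
        rcases max_choice a (s.length : Int) with h' | h'
        · exact Or.inl h'
        · exact Or.inr ⟨s, List.mem_cons_self .., h'⟩
      · exact Or.inr ⟨w, List.mem_cons_of_mem _ hw1, hw2⟩

theorem pvMaxLen_mem (sets : List (List Int)) (h : 0 < pvMaxLen sets) :
    ∃ s ∈ sets, (s.length : Int) = pvMaxLen sets := by
  rcases pvFoldMax_mem sets 0 with h' | ⟨w, hw1, hw2⟩
  · exact absurd (h'.symm ▸ h) (by unfold pvMaxLen; omega)
  · exact ⟨w, hw1, hw2.symm⟩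

-- the scan result's max is the running fold of max over lengths
theorem pvScanMax_fst (l : List (List Int)) (i ms si : Int) :
    (pvScanMax l i ms si).1 = l.foldl (fun a s => max a (s.length : Int)) ms := by
  induction l generalizing i ms si with
  | nil => simp [pvScanMax]
  | cons s rest ih =>
      simp only [pvScanMax, List.foldl_cons]
      split
      · rw [ih]; congr 1; omega
      · rw [ih]; congr 1; omega

-- scanning a list whose first maximum is s at position |pre| yields (|s|, i + |pre|)
theorem pvScanMax_first (pre : List (List Int)) (s : List Int) (rs : List (List Int))
    (i ms si : Int) (hms : ms < (s.length : Int))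
    (hpre : ∀ x ∈ pre, (x.length : Int) < (s.length : Int))
    (hrs : ∀ x ∈ rs, (x.length : Int) ≤ (s.length : Int)) :
    pvScanMax (pre ++ s :: rs) i ms si = ((s.length : Int), i + (pre.length : Int)) := by
  induction pre generalizing i ms si with
  | nil =>
      simp only [List.nil_append, pvScanMax, if_pos hms]
      have hno : ∀ (rs' : List (List Int)) (j : Int), (∀ x ∈ rs', (x.length : Int) ≤ (s.length : Int)) →
          pvScanMax rs' j (s.length : Int) i = ((s.length : Int), i) := by
        intro rs' j h
        induction rs' generalizing j with
        | nil => rfl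
        | cons a b ihb =>
            simp only [pvScanMax]
            rw [if_neg (by have := h a (List.mem_cons_self ..); omega)]
            exact ihb (j + 1) (fun x hx => h x (List.mem_cons_of_mem _ hx))
      rw [hno rs (i + 1) hrs]; simp
  | cons p pre' ih =>
      simp only [List.cons_append, pvScanMax]
      have hp := hpre p (List.mem_cons_self ..)
      split
      · rw [ih (i + 1) _ _ hp (fun x hx => hpre x (List.mem_cons_of_mem _ hx))]
        simp; omega
      · rw [ih (i + 1) _ _ hms (fun x hx => hpre x (List.mem_cons_of_mem _ hx))]
        simp; omega

theorem pvPass_id (l : List (List Int)) (m need : Int) (h : need ≤ 0) :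
    pvPass l m need = (l, need) := by
  induction l with
  | nil => rfl
  | cons s rest ih => simp only [pvPass]; rw [if_neg (by omega)]; simp [ih]

-- length bookkeeping: each split adds one element and costs one unit of need
theorem pvPass_len (l : List (List Int)) (m need : Int) :
    ((pvPass l m need).1.length : Int) = (l.length : Int) + (need - (pvPass l m need).2) := by
  induction l generalizing need with
  | nil => simp [pvPass]
  | cons s rest ih =>
      simp only [pvPass]
      split
      · have := ih (need - 1); simp only [List.length_cons]; push_cast; omega
      · have := ih need; simp only [List.length_cons]; push_cast; omega

-- Crux: running A on pre ++ rest, where every element of pre is strictly below the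
-- level m and every element of rest is at most m (m ≥ 2), equals running A after
-- batch-splitting the level-m elements of rest (with the available budget).
theorem pvL (rest : List (List Int)) (pre : List (List Int)) (t m : Int) (hm : 2 ≤ m)
    (hpre : ∀ x ∈ pre, (x.length : Int) < m) (hrest : ∀ x ∈ rest, (x.length : Int) ≤ m) :
    split_sets_py (pre ++ rest) t
      = split_sets_py (pre ++ (pvPass rest m (t - ((pre ++ rest).length : Int))).1) t := by
  induction rest generalizing pre with
  | nil => simp [pvPass]
  | cons s rs ih =>
      by_cases hneed : t - ((pre ++ s :: rs).length : Int) ≤ 0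
      · rw [pvPass_id _ _ _ hneed]
      · have hs := hrest s (List.mem_cons_self ..)
        have hrs : ∀ x ∈ rs, (x.length : Int) ≤ m := fun x hx => hrest x (List.mem_cons_of_mem _ hx)
        by_cases hsm : (s.length : Int) = m
        · -- A splits s (the first maximal element) next; the pass splits it too
          have hslen : 2 ≤ s.length := by exact_mod_cast hsm ▸ hm
          have hl : ((s.take (s.length / 2)).length : Int) < m := by
            simp only [List.length_take]; omega
          have hr : ((s.drop (s.length / 2)).length : Int) < m := by
            simp only [List.length_drop]; omega
          -- evaluate one step of A
          have hscan : pvScanMax (pre ++ s :: rs) 0 0 0 = (m, (pre.length : Int)) := by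
            rw [pvScanMax_first pre s rs 0 0 0 (by omega)
              (fun x hx => hsm ▸ hpre x hx) (fun x hx => hsm ▸ hrs x hx), hsm]
            simp
          have hget : (PySem.List.pyGet? (pre ++ s :: rs) ((pre.length : Nat) : Int)).getD [] = s := by
            simp
          have hmid : PySem.Int.floordiv ((s.length : Nat) : Int) 2 = ((s.length / 2 : Nat) : Int) := by
            exact_mod_cast PySem.Int.floordiv_natCast s.length 2
          obtain ⟨k, hk⟩ : ∃ k, (t - ((pre ++ s :: rs).length : Int)).toNat = k + 1 :=
            ⟨(t - ((pre ++ s :: rs).length : Int)).toNat - 1, by omega⟩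
          have hstep : split_sets_py (pre ++ s :: rs) t
              = pvLoopA k (pre ++ [s.take (s.length / 2), s.drop (s.length / 2)] ++ rs) := by
            show pvLoopA (t - ((pre ++ s :: rs).length : Int)).toNat (pre ++ s :: rs) = _
            rw [hk]
            simp only [pvLoopA]
            rw [if_neg (by rw [hscan]; omega), hscan]
            rw [hget, hmid]
            rw [PySem.List.slice_to_natCast, PySem.List.slice_from_natCast,
              PySem.List.slice_to_natCast]
            have h1 : ((pre.length : Int) + 1) = (((pre.length + 1 : Nat)) : Int) := by push_cast; ring
            rw [h1, PySem.List.slice_from_natCast]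
            rw [List.take_left]
            have h2 : pre ++ s :: rs = (pre ++ [s]) ++ rs := by simp
            rw [h2, List.drop_left' (by simp)]
          have hk2 : k = (t - (((pre ++ [s.take (s.length / 2), s.drop (s.length / 2)]) ++ rs).length : Int)).toNat := by
            simp only [List.length_append, List.length_cons, List.length_nil] at hk ⊢
            omega
          have hstep2 : split_sets_py (pre ++ s :: rs) t
              = split_sets_py ((pre ++ [s.take (s.length / 2), s.drop (s.length / 2)]) ++ rs) t := by
            rw [hstep]
            show _ = pvLoopA (t - ((((pre ++ [s.take (s.length / 2), s.drop (s.length / 2)]) ++ rs)).length : Int)).toNat _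
            rw [← hk2]
          rw [hstep2, ih (pre ++ [s.take (s.length / 2), s.drop (s.length / 2)])
            (by intro x hx
                rcases List.mem_append.mp hx with hx | hx
                · exact hpre x hx
                · simp only [List.mem_cons, List.not_mem_nil, or_false] at hx
                  rcases hx with rfl | rfl
                  · exact hl
                  · exact hr) hrs]
          have hlen : t - (((pre ++ [s.take (s.length / 2), s.drop (s.length / 2)]) ++ rs).length : Int)
              = t - ((pre ++ s :: rs).length : Int) - 1 := by simp; ring
          rw [hlen]
          have hpassunf : pvPass (s :: rs) m (t - ((pre ++ s :: rs).length : Int))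
              = (s.take (s.length / 2) :: s.drop (s.length / 2) :: (pvPass rs m (t - ((pre ++ s :: rs).length : Int) - 1)).1,
                 (pvPass rs m (t - ((pre ++ s :: rs).length : Int) - 1)).2) := by
            simp only [pvPass]; rw [if_pos ⟨hsm, by omega⟩]
          rw [hpassunf]
          simp
        · -- s is below the level: the pass keeps it, A never touches it in this round
          have hpassunf : pvPass (s :: rs) m (t - ((pre ++ s :: rs).length : Int))
              = (s :: (pvPass rs m (t - ((pre ++ s :: rs).length : Int))).1,
                 (pvPass rs m (t - ((pre ++ s :: rs).length : Int))).2) := by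
            simp only [pvPass]; rw [if_neg (by exact fun h => hsm h.1)]
          rw [hpassunf]
          have h2 : pre ++ s :: rs = (pre ++ [s]) ++ rs := by simp
          have h3 : t - ((pre ++ s :: rs).length : Int) = t - (((pre ++ [s]) ++ rs).length : Int) := by
            simp
          rw [h3, h2, ih (pre ++ [s])
            (by intro x hx
                rcases List.mem_append.mp hx with hx | hx
                · exact hpre x hx
                · simp only [List.mem_cons, List.not_mem_nil, or_false] at hx
                  subst hx; omega) hrs]
          simp

-- main induction on the remaining budget: enough fuel makes pvLoopB's value
-- independent of the exact fuel, and A's loop equals B's batched loop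
theorem pvMain (fuel : Nat) (sets : List (List Int)) (t : Int)
    (hfuel : (t - (sets.length : Int)).toNat ≤ fuel) :
    split_sets_py sets t = pvLoopB fuel sets (t - (sets.length : Int)) := by
  induction fuel generalizing sets with
  | zero =>
      have hneed : t - (sets.length : Int) ≤ 0 := by omega
      show pvLoopA (t - (sets.length : Int)).toNat sets = pvLoopB 0 sets _
      rw [(by omega : (t - (sets.length : Int)).toNat = 0)]
      rfl
  | succ k ih =>
      by_cases hneed : t - (sets.length : Int) ≤ 0
      · show pvLoopA (t - (sets.length : Int)).toNat sets = pvLoopB (k + 1) sets _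
        rw [(by omega : (t - (sets.length : Int)).toNat = 0)]
        simp only [pvLoopB]
        rw [if_pos hneed]
        rfl
      · rw [pvLoopB, if_neg hneed]
        by_cases hm : pvMaxLen sets ≤ 1
        · rw [if_pos hm]
          obtain ⟨j, hj⟩ : ∃ j, (t - (sets.length : Int)).toNat = j + 1 :=
            ⟨(t - (sets.length : Int)).toNat - 1, by omega⟩
          show pvLoopA (t - (sets.length : Int)).toNat sets = sets
          rw [hj]
          simp only [pvLoopA]
          rw [if_pos (by
            show (pvScanMax sets 0 0 0).1 ≤ 1
            rw [pvScanMax_fst]; exact hm)]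
        · rw [if_neg hm]
          have hrest : ∀ x ∈ sets, (x.length : Int) ≤ pvMaxLen sets :=
            (pvFoldMax_ge sets 0).2
          have hA := pvL sets [] t (pvMaxLen sets) (by omega) (by simp) hrest
          simp only [List.nil_append] at hA
          rw [hA]
          have hlen := pvPass_len sets (pvMaxLen sets) (t - (sets.length : Int))
          have hlt := pvPass_lt sets (pvMaxLen sets) (t - (sets.length : Int)) (by omega)
            (pvMaxLen_mem sets (by omega))
          have := ih (pvPass sets (pvMaxLen sets) (t - (sets.length : Int))).1 (by omega)
          rw [this]
          congr 1
          omega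

-- ===== VERDICT (by name: the statement is the Claim_ definition above) =====
theorem split_sets_py_spec : Claim_equal_split_sets_py := by
  intro sets t _
  unfold Spec_split_sets_py split_sets_py_alt
  exact pvMain (t - (sets.length : Int)).toNat sets t le_rfl
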